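-- pv_equiv track=rewrite | github.com/stefanchp/LFA-Assignments | tema-3/LFA-Assignment3.py | recognize_anbncn
-- ===== SOURCE A (Python) =====
-- def recognize_anbncn(s):
--     if not s:
--         return False
--     length = len(s)
--
--     idx = 0
--     while idx < length and s[idx] == 'a':
--         idx += 1
--     num_a = idx
--     if num_a == 0:
--         return False
--
--     start_b = idx
--     while idx < length and s[idx] == 'b':
--         idx += 1
--     num_b = idx - start_b
--     if num_b != num_a:
--         return False
--
--     start_c = idx
--     while idx < length and s[idx] == 'c':
--         idx += 1
--     num_c = idx - start_c
--     if num_c != num_a: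
--         return False
--
--     if idx != length:
--         return False
--     return True
-- ===== SOURCE B (Python) =====
-- def recognize_anbncn(s):
--     L = len(s)
--     if L == 0 or L % 3 != 0:
--         return False
--     n = L // 3
--     return s == 'a' * n + 'b' * n + 'c' * n
-- ===== Notes on version B (the rewrite author's own statement) =====
-- stated objective: simpler
-- what changed: Replaces the three sequential scan-and-count loops over the string by a closed-form check: length nonzero and divisible by 3, then one comparison against the canonical string built as n a's, n b's, n c's.
import Mathlib
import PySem

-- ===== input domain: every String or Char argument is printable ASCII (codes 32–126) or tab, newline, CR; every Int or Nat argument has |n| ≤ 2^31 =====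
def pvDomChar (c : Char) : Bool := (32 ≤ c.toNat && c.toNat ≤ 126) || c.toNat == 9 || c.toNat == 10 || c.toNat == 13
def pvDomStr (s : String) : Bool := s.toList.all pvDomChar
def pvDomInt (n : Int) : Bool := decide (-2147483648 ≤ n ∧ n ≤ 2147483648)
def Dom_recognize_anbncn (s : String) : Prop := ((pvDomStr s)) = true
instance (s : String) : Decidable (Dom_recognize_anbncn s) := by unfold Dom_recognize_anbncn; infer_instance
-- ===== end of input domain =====

-- B replaces A's three scanning-while-loops by a closed-form length check and one
-- comparison with the constructed string 'a'*n+'b'*n+'c'*n (objective: simpler).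

-- ===== PORT A =====
-- each of A's 'while idx < length and s[idx] == ch' loops: counts leading ch's and
-- returns the count together with the remaining suffix (idx advanced past them)
def pvScan (c : Char) : List Char → Nat × List Char
  | [] => (0, [])
  | x :: xs =>
    if x = c then ((pvScan c xs).1 + 1, (pvScan c xs).2)
    else (0, x :: xs)

def recognize_anbncn (s : String) : Bool :=
  let l := s.toList
  if l = [] then false else
  let p1 := pvScan 'a' l
  if p1.1 = 0 then false else
  let p2 := pvScan 'b' p1.2
  if p2.1 ≠ p1.1 then false else
  let p3 := pvScan 'c' p2.2
  if p3.1 ≠ p1.1 then false else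
  decide (p3.2 = [])        -- 'if idx != length: return False; return True'

-- ===== PORT B =====
def recognize_anbncn_alt (s : String) : Bool :=
  let L := s.toList.length
  if L = 0 ∨ L % 3 ≠ 0 then false else
  let n := L / 3
  decide (s.toList = List.replicate n 'a' ++ List.replicate n 'b' ++ List.replicate n 'c')

-- ===== PRECONDITION & SPEC =====
def Spec_recognize_anbncn (s : String) (out : Bool) : Prop := out = recognize_anbncn_alt s
instance (s : String) (out : Bool) : Decidable (Spec_recognize_anbncn s out) := by unfold Spec_recognize_anbncn; infer_instance

-- ===== CLAIM (what is proved, stated in full; the proofs are below) =====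
def Claim_equal_recognize_anbncn : Prop := ∀ (s : String), Dom_recognize_anbncn s → Spec_recognize_anbncn s (recognize_anbncn s)

-- ===== LEMMAS AND PROOFS =====

-- pvScan splits its input: the string is (count) copies of c followed by the rest
theorem pvScan_decomp (c : Char) (l : List Char) :
    l = List.replicate (pvScan c l).1 c ++ (pvScan c l).2 := by
  induction l with
  | nil => simp [pvScan]
  | cons x xs ih =>
    by_cases h : x = c
    · simp [pvScan, h, List.replicate_succ]
      exact ih
    · simp [pvScan, h]

-- pvScan on (replicate n c ++ r) with r not starting with c returns (n, r)
theorem pvScan_rep (c : Char) (n : Nat) (r : List Char)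
    (h : ∀ x xs, r = x :: xs → x ≠ c) :
    pvScan c (List.replicate n c ++ r) = (n, r) := by
  induction n with
  | zero =>
    simp only [List.replicate_zero, List.nil_append]
    cases r with
    | nil => simp [pvScan]
    | cons x xs => simp [pvScan, h x xs rfl]
  | succ m ih =>
    simp [List.replicate_succ, pvScan, ih]

theorem core_iff (l : List Char) :
    ((if l = [] then false else
      let p1 := pvScan 'a' l
      if p1.1 = 0 then false else
      let p2 := pvScan 'b' p1.2
      if p2.1 ≠ p1.1 then false else
      let p3 := pvScan 'c' p2.2
      if p3.1 ≠ p1.1 then false else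
      decide (p3.2 = [])) = true)
    ↔ (∃ n : Nat, 1 ≤ n ∧ l = List.replicate n 'a' ++ List.replicate n 'b' ++ List.replicate n 'c') := by
  constructor
  · intro h
    by_cases h0 : l = []
    · simp [h0] at h
    rw [if_neg h0] at h
    by_cases h1 : (pvScan 'a' l).1 = 0
    · simp [h1] at h
    rw [if_neg h1] at h
    by_cases h2 : (pvScan 'b' (pvScan 'a' l).2).1 ≠ (pvScan 'a' l).1
    · simp [if_pos h2] at h
    rw [if_neg h2] at h
    by_cases h3 : (pvScan 'c' (pvScan 'b' (pvScan 'a' l).2).2).1 ≠ (pvScan 'a' l).1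
    · simp [if_pos h3] at h
    rw [if_neg h3] at h
    simp only [decide_eq_true_eq] at h
    refine ⟨(pvScan 'a' l).1, by omega, ?_⟩
    have e2 : (pvScan 'b' (pvScan 'a' l).2).1 = (pvScan 'a' l).1 := not_ne_iff.mp h2
    have e3 : (pvScan 'c' (pvScan 'b' (pvScan 'a' l).2).2).1 = (pvScan 'a' l).1 := not_ne_iff.mp h3
    have d1 := pvScan_decomp 'a' l
    have d2 := pvScan_decomp 'b' (pvScan 'a' l).2
    have d3 := pvScan_decomp 'c' (pvScan 'b' (pvScan 'a' l).2).2
    rw [h, List.append_nil, e3] at d3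
    rw [d3, e2] at d2
    rw [d2] at d1
    rw [List.append_assoc]
    exact d1
  · rintro ⟨n, hn, rfl⟩
    have hb : ∀ x xs, (List.replicate n 'b' ++ List.replicate n 'c') = x :: xs → x ≠ 'a' := by
      intro x xs hx
      cases n with
      | zero => omega
      | succ m => simp [List.replicate_succ] at hx; rw [← hx.1]; decide
    have hc : ∀ (x : Char) xs, (List.replicate n 'c') = x :: xs → x ≠ 'b' := by
      intro x xs hx
      cases n with
      | zero => simp at hx
      | succ m => simp [List.replicate_succ] at hx; rw [← hx.1]; decide
    have hnil : ∀ (x : Char) xs, ([] : List Char) = x :: xs → x ≠ 'c' := by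
      intro x xs hx; simp at hx
    have s1 : pvScan 'a' (List.replicate n 'a' ++ List.replicate n 'b' ++ List.replicate n 'c')
        = (n, List.replicate n 'b' ++ List.replicate n 'c') := by
      rw [List.append_assoc]; exact pvScan_rep 'a' n _ hb
    have s2 : pvScan 'b' (List.replicate n 'b' ++ List.replicate n 'c') = (n, List.replicate n 'c') := by
      have := pvScan_rep 'b' n (List.replicate n 'c') hc
      simpa using this
    have s3 : pvScan 'c' (List.replicate n 'c') = (n, []) := by
      have := pvScan_rep 'c' n [] hnil
      simpa using this
    have hne : (List.replicate n 'a' ++ List.replicate n 'b' ++ List.replicate n 'c') ≠ [] := by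
      cases n with
      | zero => omega
      | succ m => simp [List.replicate_succ]
    have hn0 : n ≠ 0 := by omega
    rw [if_neg hne]
    simp only [s1, s2, s3]
    simp [hn0]

theorem alt_iff (l : List Char) :
    ((if l.length = 0 ∨ l.length % 3 ≠ 0 then false else
      decide (l = List.replicate (l.length / 3) 'a' ++ List.replicate (l.length / 3) 'b' ++ List.replicate (l.length / 3) 'c')) = true)
    ↔ (∃ n : Nat, 1 ≤ n ∧ l = List.replicate n 'a' ++ List.replicate n 'b' ++ List.replicate n 'c') := by
  constructor
  · intro h
    split_ifs at h with h0
    simp only [decide_eq_true_eq] at h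
    push Not at h0
    exact ⟨l.length / 3, by omega, h⟩
  · rintro ⟨n, hn, rfl⟩
    have hlen : (List.replicate n 'a' ++ List.replicate n 'b' ++ List.replicate n 'c').length = 3 * n := by
      simp; omega
    rw [hlen]
    have h0 : ¬ (3 * n = 0 ∨ 3 * n % 3 ≠ 0) := by omega
    have hdiv : 3 * n / 3 = n := by omega
    rw [if_neg h0, hdiv]
    simp

-- ===== VERDICT (by name: the statement is the Claim_ definition above) =====
theorem recognize_anbncn_spec : Claim_equal_recognize_anbncn := by
  intro s _
  unfold Spec_recognize_anbncn recognize_anbncn recognize_anbncn_alt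
  have hA := core_iff s.toList
  have hB := alt_iff s.toList
  simp only at hA hB ⊢
  by_cases h : ∃ n : Nat, 1 ≤ n ∧ s.toList = List.replicate n 'a' ++ List.replicate n 'b' ++ List.replicate n 'c'
  · rw [hA.mpr h, hB.mpr h]
  · rw [Bool.eq_iff_iff]
    constructor
    · intro ha; exact absurd (hA.mp ha) h
    · intro hb; exact absurd (hB.mp hb) h
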